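-- pv_equiv track=rewrite | github.com/CoeCollege-ComputerScience/dice-games-samkelchen | multiplesStay.py | countOutcomes
-- ===== SOURCE A (Python) =====
-- def countOutcomes(rolls):           # copilot helped me with this part
--     outcome_counts = {}
--     for roll in rolls:
--         if roll in outcome_counts:
--             outcome_counts[roll] += 1
--         else:
--             outcome_counts[roll] = 1
--     return outcome_counts
-- ===== SOURCE B (Python) =====
-- def countOutcomes(rolls):
--     # distinct values in first-occurrence order, then one full scan per value
--     return {v: rolls.count(v) for v in dict.fromkeys(rolls)}
-- ===== Notes on version B (the rewrite author's own statement) =====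
-- stated objective: alternative
-- what changed: Replaces A's single incremental counting pass (membership test then increment-or-insert) with a dict comprehension over the distinct values in first-occurrence order, counting each with rolls.count(v) in a separate full scan.
import Mathlib
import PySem

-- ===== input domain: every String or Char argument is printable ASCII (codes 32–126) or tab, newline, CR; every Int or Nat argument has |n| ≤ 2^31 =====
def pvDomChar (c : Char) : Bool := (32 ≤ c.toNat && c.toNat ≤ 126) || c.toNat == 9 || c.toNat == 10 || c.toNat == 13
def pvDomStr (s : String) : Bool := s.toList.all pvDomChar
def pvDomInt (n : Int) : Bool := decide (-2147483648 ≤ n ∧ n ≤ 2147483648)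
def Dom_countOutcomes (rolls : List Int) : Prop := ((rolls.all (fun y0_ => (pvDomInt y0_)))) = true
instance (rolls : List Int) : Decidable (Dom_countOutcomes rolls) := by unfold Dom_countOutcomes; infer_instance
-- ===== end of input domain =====

-- B counts each distinct value with a separate rolls.count scan (dict comprehension over
-- dict.fromkeys dedup) instead of A's single incremental pass; objective: alternative.

-- ===== PORT A =====
def countOutcomes (rolls : List Int) : List (Int × Int) :=
  (rolls.foldl
    (fun d roll =>
      if d.contains roll then d.modify roll 0 (· + 1)
      else d.insert roll 1)
    PySem.Dict.empty).items

-- ===== PORT B =====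
-- {v: rolls.count(v) for v in dict.fromkeys(rolls)}
def countOutcomes_alt (rolls : List Int) : List (Int × Int) :=
  ((PySem.List.dedup rolls).foldl
    (fun d v => d.insert v (rolls.count v : Int))
    PySem.Dict.empty).items

-- ===== PRECONDITION & SPEC =====
def Spec_countOutcomes (rolls : List Int) (out : List (Int × Int)) : Prop := out = countOutcomes_alt rolls
instance (rolls : List Int) (out : List (Int × Int)) : Decidable (Spec_countOutcomes rolls out) := by unfold Spec_countOutcomes; infer_instance

-- ===== CLAIM (what is proved, stated in full; the proofs are below) =====
def Claim_equal_countOutcomes : Prop := ∀ (rolls : List Int), Dom_countOutcomes rolls → Spec_countOutcomes rolls (countOutcomes rolls)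

-- ===== LEMMAS AND PROOFS =====

-- A's loop body equals the Counter step: when the key is absent, modify inserts f(default) = 1.
theorem pvStep_eq (d : PySem.Dict Int Int) (x : Int) :
    (if d.contains x then d.modify x 0 (· + 1) else d.insert x 1) = d.modify x 0 (· + 1) := by
  by_cases h : d.contains x = true
  · simp [h]
  · rw [if_neg h, PySem.Dict.modify,
      PySem.Dict.getD_of_not_contains (d := d) (k := x) (d0 := 0) (h := by simpa using h)]
    norm_num

-- A's dict IS the Counter of rolls.
theorem pvA_eq_counter (rolls : List Int) :
    rolls.foldl
      (fun d roll => if d.contains roll then d.modify roll 0 (· + 1) else d.insert roll 1)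
      PySem.Dict.empty
      = PySem.Dict.counter rolls := by
  rw [PySem.Dict.counter_eq_foldl]
  induction rolls using List.reverseRecOn with
  | nil => rfl
  | append_singleton xs x ih => simp [List.foldl_append, pvStep_eq]

-- ===== VERDICT (by name: the statement is the Claim_ definition above) =====
theorem countOutcomes_spec : Claim_equal_countOutcomes := by
  intro rolls _
  unfold Spec_countOutcomes countOutcomes countOutcomes_alt
  rw [pvA_eq_counter, PySem.Dict.items_counter]
  have hB := PySem.Dict.items_foldl_insert_fresh (l := PySem.List.dedup rolls)
      (d := PySem.Dict.empty) (k := fun v => v) (v := fun v => (rolls.count v : Int))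
      (by simp [PySem.Dict.contains_empty])
      (by simpa using PySem.List.nodup_dedup rolls)
  simp only [] at hB
  rw [hB]
  simp [show (PySem.Dict.empty : PySem.Dict Int Int).items = [] from rfl, PySem.List.dedup_eq_ofList]
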